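-- pv_equiv track=rewrite | github.com/andradatinta/TintaAndradaPythonA1 | Lab3/lab3ex9.py | cantSee
-- ===== SOURCE A (Python) =====
-- def cantSee(people):
--     result = []
--     numberOfColumns = len(people[0])
--     for j in range(0, numberOfColumns):
--         tallest = 0
--         index = 0
--         for i in range(0, len(people)):
--             if people[i][j] > tallest:
--                 tallest = people[i][j]
--                 index = i
--             elif i > index:
--                 result.append((i, j))
--     return result
-- ===== SOURCE B (Python) =====
-- def cantSee(people):
--     numberOfColumns = len(people[0])
--     result = []
--     for j in range(numberOfColumns):
--         column = [row[j] for row in people]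
--         # prefix-maxima table with a 0 floor: prefixMax[i] = max(0, column[0..i-1])
--         prefixMax = [0]
--         for v in column[:-1]:
--             prefixMax.append(prefixMax[-1] if prefixMax[-1] > v else v)
--         result.extend((i, j) for i in range(1, len(column)) if column[i] <= prefixMax[i])
--     return result
-- ===== Notes on version B (the rewrite author's own statement) =====
-- stated objective: alternative
-- what changed: Replaces A's single stateful scan (running 'tallest' plus last-update 'index' deciding emission inline) by a per-column pipeline: extract the column, materialize a prefix-maxima table with a 0 floor, then emit (i,j) in a separate comprehension pass whenever i>0 and column[i] <= prefixMax[i]; the 'index' state variable disappears.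
import Mathlib
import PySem

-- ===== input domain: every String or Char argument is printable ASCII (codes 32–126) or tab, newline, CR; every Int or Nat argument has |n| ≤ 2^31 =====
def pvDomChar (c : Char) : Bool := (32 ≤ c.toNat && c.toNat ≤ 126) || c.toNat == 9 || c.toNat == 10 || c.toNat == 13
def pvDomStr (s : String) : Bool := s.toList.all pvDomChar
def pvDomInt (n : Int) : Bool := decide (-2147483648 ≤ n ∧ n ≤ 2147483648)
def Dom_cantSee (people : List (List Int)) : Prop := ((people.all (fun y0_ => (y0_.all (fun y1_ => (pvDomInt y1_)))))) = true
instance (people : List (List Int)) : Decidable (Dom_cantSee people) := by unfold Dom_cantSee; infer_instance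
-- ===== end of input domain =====

-- B recomputes each column's running maximum as a materialized prefix-max table and emits in a
-- separate pass, removing A's 'index' state variable; objective: alternative decomposition.

-- ===== PORT A =====
-- people[i][j] is in range under Pre_ (i < len people, j < len people[0] ≤ len people[i]),
-- so List.getD is exact there.
def cantSee (people : List (List Int)) : List (Int × Int) :=
  let numberOfColumns := (people.headD []).length
  (List.range numberOfColumns).foldl (fun result j =>
    ((List.range people.length).foldl
      (fun (acc : List (Int × Int) × Int × Nat) i =>
        let v := (people.getD i []).getD j 0
        if v > acc.2.1 then (acc.1, v, i)
        else if i > acc.2.2 then (acc.1 ++ [((i : Int), (j : Int))], acc.2.1, acc.2.2)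
        else acc)
      (result, (0 : Int), (0 : Nat))).1) []

-- ===== PORT B =====
-- row[j] is in range under Pre_, so List.getD is exact there.
def cantSee_alt (people : List (List Int)) : List (Int × Int) :=
  let numberOfColumns := (people.headD []).length
  (List.range numberOfColumns).foldl (fun result j =>
    let column := people.map (fun row => row.getD j 0)
    let prefixMax := column.dropLast.foldl
      (fun pm v => pm ++ [if pm.getLastD 0 > v then pm.getLastD 0 else v]) [(0 : Int)]
    result ++ (List.range' 1 (column.length - 1)).filterMap (fun i =>
      if column.getD i 0 ≤ prefixMax.getD i 0 then some ((i : Int), (j : Int)) else none)) []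

-- ===== PRECONDITION & SPEC =====
-- A evaluates people[0] and people[i][j] for every i and every j < len(people[0]):
-- Pre_ excludes exactly the empty list and rows shorter than row 0, where A raises IndexError.
def Pre_cantSee (people : List (List Int)) : Prop :=
  people ≠ [] ∧ ∀ row ∈ people, (people.headD []).length ≤ row.length
instance (people : List (List Int)) : Decidable (Pre_cantSee people) := by
  unfold Pre_cantSee; infer_instance
def pvWitness_cantSee : List (List Int) := [[3, 1], [2, 5], [2, 4]]
def Spec_cantSee (people : List (List Int)) (out : List (Int × Int)) : Prop := out = cantSee_alt people
instance (people : List (List Int)) (out : List (Int × Int)) : Decidable (Spec_cantSee people out) := by unfold Spec_cantSee; infer_instance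

-- ===== CLAIM (what is proved, stated in full; the proofs are below) =====
def Claim_equal_cantSee : Prop := ∀ (people : List (List Int)), Dom_cantSee people → Pre_cantSee people → Spec_cantSee people (cantSee people)

-- ===== LEMMAS AND PROOFS =====

-- prefix max of col with a 0 floor: pmx col i = max over 0 and col[0..i-1]
def pmx (col : List Int) (i : Nat) : Int := (col.take i).foldl max 0

-- the common per-column emission
def emitCol (col : List Int) (j : Nat) : List (Int × Int) :=
  (List.range' 1 (col.length - 1)).filterMap (fun i =>
    if col.getD i 0 ≤ pmx col i then some ((i : Int), (j : Int)) else none)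

theorem pmx_succ (col : List Int) (s : Nat) (h : s < col.length) :
    pmx col (s + 1) = max (pmx col s) (col.getD s 0) := by
  unfold pmx
  have h1 : col.take (s + 1) = col.take s ++ [col[s]] := by
    rw [List.take_add_one, List.getElem?_eq_getElem h]; rfl
  rw [h1, List.foldl_append]
  simp [List.getD_eq_getElem?_getD, List.getElem?_eq_getElem h]

-- scan of running max
def smax : Int → List Int → List Int
  | _, [] => []
  | a, v :: vs => max a v :: smax (max a v) vs

theorem smax_getD (l : List Int) (a : Int) (k : Nat) (hk : k < l.length) :
    (smax a l).getD k 0 = (l.take (k + 1)).foldl max a := by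
  induction l generalizing a k with
  | nil => simp at hk
  | cons v vs ih =>
    cases k with
    | zero => simp [smax]
    | succ k =>
      simp only [smax, List.getD_cons_succ, List.take_succ_cons, List.foldl_cons]
      exact ih (max a v) k (by simpa using hk)

theorem pm_fold_eq (l acc : List Int) (hacc : acc ≠ []) :
    l.foldl (fun pm v => pm ++ [if pm.getLastD 0 > v then pm.getLastD 0 else v]) acc
      = acc ++ smax (acc.getLastD 0) l := by
  induction l generalizing acc with
  | nil => simp [smax]
  | cons v vs ih =>
    simp only [List.foldl_cons, smax]
    have hne : acc ++ [if acc.getLastD 0 > v then acc.getLastD 0 else v] ≠ [] := by simp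
    rw [ih _ hne]
    have hmax : (if acc.getLastD 0 > v then acc.getLastD 0 else v) = max (acc.getLastD 0) v := by
      rcases le_or_gt (acc.getLastD 0) v with h | h
      · rw [if_neg (not_lt.mpr h), max_eq_right h]
      · rw [if_pos h, max_eq_left h.le]
    have hlast : (acc ++ [if acc.getLastD 0 > v then acc.getLastD 0 else v]).getLastD 0
        = max (acc.getLastD 0) v := by
      rw [hmax]; simp
    rw [hlast, hmax]
    simp

theorem prefixMax_getD (col : List Int) (i : Nat) (h1 : 1 ≤ i) (h2 : i < col.length) :
    (col.dropLast.foldl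
       (fun pm v => pm ++ [if pm.getLastD 0 > v then pm.getLastD 0 else v]) [(0 : Int)]).getD i 0
      = pmx col i := by
  rw [pm_fold_eq _ _ (by simp), show ([(0 : Int)]).getLastD 0 = (0 : Int) from rfl]
  have hlen : i - 1 < col.dropLast.length := by
    simp [List.length_dropLast]; omega
  have : ([(0 : Int)] ++ smax 0 col.dropLast).getD i 0 = (smax 0 col.dropLast).getD (i - 1) 0 := by
    cases i with
    | zero => omega
    | succ k => simp
  rw [this, smax_getD _ _ _ hlen]
  have : col.dropLast.take (i - 1 + 1) = col.take i := by
    rw [List.dropLast_eq_take, List.take_take]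
    congr 1
    omega
  rw [this]
  rfl

-- generic filterMap congruence on members
theorem filterMap_congr_mem {α β : Type} (l : List α) (f g : α → Option β)
    (h : ∀ x ∈ l, f x = g x) : l.filterMap f = l.filterMap g := by
  induction l with
  | nil => rfl
  | cons x xs ih =>
    simp only [List.filterMap_cons, h x (by simp)]
    rw [ih (fun y hy => h y (by simp [hy]))]

-- B's per-column body equals emitCol
theorem bodyB_eq (people : List (List Int)) (j : Nat) (result : List (Int × Int)) :
    (let column := people.map (fun row => row.getD j 0)
     let prefixMax := column.dropLast.foldl
       (fun pm v => pm ++ [if pm.getLastD 0 > v then pm.getLastD 0 else v]) [(0 : Int)]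
     result ++ (List.range' 1 (column.length - 1)).filterMap (fun i =>
       if column.getD i 0 ≤ prefixMax.getD i 0 then some ((i : Int), (j : Int)) else none))
      = result ++ emitCol (people.map (fun row => row.getD j 0)) j := by
  simp only [emitCol]
  congr 1
  apply filterMap_congr_mem
  intro i hi
  rw [List.mem_range'] at hi
  obtain ⟨k, hk1, hk2⟩ := hi
  have h1 : 1 ≤ i := by omega
  have h2 : i < (people.map (fun row => row.getD j 0)).length := by omega
  rw [prefixMax_getD _ i h1 h2]

-- A's inner loop invariant
theorem loopA (col : List Int) (j : Nat) (n : Nat) :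
    ∀ (s : Nat) (res : List (Int × Int)) (idx : Nat),
      n = col.length - s → (idx < s ∨ (s = 0 ∧ idx = 0)) →
      ((List.range' s n).foldl
        (fun (acc : List (Int × Int) × Int × Nat) i =>
          let v := col.getD i 0
          if v > acc.2.1 then (acc.1, v, i)
          else if i > acc.2.2 then (acc.1 ++ [((i : Int), (j : Int))], acc.2.1, acc.2.2)
          else acc)
        (res, pmx col s, idx)).1
        = res ++ (List.range' (max s 1) (col.length - max s 1)).filterMap (fun i =>
            if col.getD i 0 ≤ pmx col i then some ((i : Int), (j : Int)) else none) := by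
  induction n with
  | zero =>
    intro s res idx hn _
    have h : col.length - max s 1 = 0 := by omega
    simp [h, List.range']
  | succ n ih =>
    intro s res idx hn hinv
    have hs : s < col.length := by omega
    rw [List.range'_succ, List.foldl_cons]
    simp only
    by_cases hv : col.getD s 0 > pmx col s
    · -- update branch: tallest := v, index := s; nothing emitted at s
      rw [if_pos hv]
      have hpm : col.getD s 0 = pmx col (s + 1) := by
        rw [pmx_succ col s hs]; omega
      rw [hpm]
      rw [ih (s + 1) res s (by omega) (by omega)]
      congr 1
      -- relate the two emission ranges
      rcases Nat.eq_zero_or_pos s with h0 | h1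
      · subst h0; simp
      · have hms : max s 1 = s := by omega
        have hms1 : max (s + 1) 1 = s + 1 := by omega
        rw [hms, hms1]
        have : col.length - s = (col.length - (s + 1)) + 1 := by omega
        rw [this, List.range'_succ, List.filterMap_cons]
        rw [if_neg (by omega)]
    · rw [if_neg hv]
      have hpm : pmx col (s + 1) = pmx col s := by
        rw [pmx_succ col s hs]; omega
      by_cases hidx : s > idx
      · -- emit (s, j)
        rw [if_pos hidx]
        rw [← hpm, ih (s + 1) _ idx (by omega) (by omega)]
        have h1 : 1 ≤ s := by omega
        have hms : max s 1 = s := by omega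
        have hms1 : max (s + 1) 1 = s + 1 := by omega
        rw [hms, hms1]
        have : col.length - s = (col.length - (s + 1)) + 1 := by omega
        rw [this, List.range'_succ, List.filterMap_cons, if_pos (by omega)]
        simp
      · -- s ≤ idx; by the invariant s = 0 and idx = 0
        rw [if_neg hidx]
        have hs0 : s = 0 ∧ idx = 0 := by omega
        obtain ⟨h0, hi0⟩ := hs0
        subst h0; subst hi0
        rw [← hpm, ih 1 res 0 (by omega) (by omega)]
        simp
-- A's per-column body equals emitCol, via the column list
theorem bodyA_eq (people : List (List Int)) (j : Nat) (result : List (Int × Int)) :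
    ((List.range people.length).foldl
      (fun (acc : List (Int × Int) × Int × Nat) i =>
        let v := (people.getD i []).getD j 0
        if v > acc.2.1 then (acc.1, v, i)
        else if i > acc.2.2 then (acc.1 ++ [((i : Int), (j : Int))], acc.2.1, acc.2.2)
        else acc)
      (result, (0 : Int), (0 : Nat))).1
      = result ++ emitCol (people.map (fun row => row.getD j 0)) j := by
  set col := people.map (fun row => row.getD j 0) with hcol
  have hbody : ((List.range people.length).foldl
      (fun (acc : List (Int × Int) × Int × Nat) i =>
        let v := (people.getD i []).getD j 0
        if v > acc.2.1 then (acc.1, v, i)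
        else if i > acc.2.2 then (acc.1 ++ [((i : Int), (j : Int))], acc.2.1, acc.2.2)
        else acc)
      (result, (0 : Int), (0 : Nat)))
      = ((List.range people.length).foldl
      (fun (acc : List (Int × Int) × Int × Nat) i =>
        let v := col.getD i 0
        if v > acc.2.1 then (acc.1, v, i)
        else if i > acc.2.2 then (acc.1 ++ [((i : Int), (j : Int))], acc.2.1, acc.2.2)
        else acc)
      (result, (0 : Int), (0 : Nat))) := by
    apply PySem.List.foldl_congr_mem
    intro acc i hi
    rw [List.mem_range] at hi
    have : col.getD i 0 = (people.getD i []).getD j 0 := by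
      rw [hcol]
      rw [List.getD_eq_getElem?_getD, List.getElem?_map]
      rw [List.getElem?_eq_getElem hi]
      simp [List.getD_eq_getElem?_getD, List.getElem?_eq_getElem hi]
    simp only [this]
  rw [hbody]
  have hlen : people.length = col.length := by simp [hcol]
  have h0 : List.range people.length = List.range' 0 col.length := by
    rw [hlen, List.range_eq_range']
  rw [h0]
  have := loopA col j col.length 0 result 0 (by omega) (by omega)
  rw [show pmx col 0 = 0 from rfl] at this
  rw [this]
  rfl

-- ===== VERDICT (by name: the statement is the Claim_ definition above) =====
theorem cantSee_spec : Claim_equal_cantSee := by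
  intro people _ _
  unfold Spec_cantSee cantSee cantSee_alt
  simp only
  have hA : ∀ result j, ((List.range people.length).foldl
      (fun (acc : List (Int × Int) × Int × Nat) i =>
        let v := (people.getD i []).getD j 0
        if v > acc.2.1 then (acc.1, v, i)
        else if i > acc.2.2 then (acc.1 ++ [((i : Int), (j : Int))], acc.2.1, acc.2.2)
        else acc)
      (result, (0 : Int), (0 : Nat))).1
      = result ++ emitCol (people.map (fun row => row.getD j 0)) j := fun result j =>
    bodyA_eq people j result
  have hB : ∀ result j,
      (let column := people.map (fun row => row.getD j 0)
       let prefixMax := column.dropLast.foldl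
         (fun pm v => pm ++ [if pm.getLastD 0 > v then pm.getLastD 0 else v]) [(0 : Int)]
       result ++ (List.range' 1 (column.length - 1)).filterMap (fun i =>
         if column.getD i 0 ≤ prefixMax.getD i 0 then some ((i : Int), (j : Int)) else none))
        = result ++ emitCol (people.map (fun row => row.getD j 0)) j := fun result j =>
    bodyB_eq people j result
  induction (List.range (people.headD []).length) using List.reverseRecOn with
  | nil => rfl
  | append_singleton l x ih =>
    rw [List.foldl_append, List.foldl_append, ih]
    simp only [List.foldl_cons, List.foldl_nil]
    rw [hA, hB]
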